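-- pv_equiv track=rewrite | github.com/Chun-Po-Wang-1999/MyStanCodeProject | StanCode_Projects/boggle_game_solver/boggle.py | input_check
-- ===== SOURCE A (Python) =====
-- def input_check(row):
-- 	if len(row) != 7:
-- 		return False
-- 	else:
-- 		for i in range(len(row)):
-- 			if i % 2 != 0:  # i is even
-- 				if row[i] != ' ':
-- 					return False
-- 			else:
-- 				if not row[i].isalpha():
-- 					return False
-- 		return True
-- ===== SOURCE B (Python) =====
-- def input_check(row):
--     return len(row) == 7 and row[::2].isalpha() and row[1::2] == '   '
-- ===== Notes on version B (the rewrite author's own statement) =====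
-- stated objective: idiomatic
-- what changed: Replaced the index-parity loop with a length guard plus two strided-slice checks: the even-index slice must be alphabetic and the odd-index slice must be all spaces.
import Mathlib
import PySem

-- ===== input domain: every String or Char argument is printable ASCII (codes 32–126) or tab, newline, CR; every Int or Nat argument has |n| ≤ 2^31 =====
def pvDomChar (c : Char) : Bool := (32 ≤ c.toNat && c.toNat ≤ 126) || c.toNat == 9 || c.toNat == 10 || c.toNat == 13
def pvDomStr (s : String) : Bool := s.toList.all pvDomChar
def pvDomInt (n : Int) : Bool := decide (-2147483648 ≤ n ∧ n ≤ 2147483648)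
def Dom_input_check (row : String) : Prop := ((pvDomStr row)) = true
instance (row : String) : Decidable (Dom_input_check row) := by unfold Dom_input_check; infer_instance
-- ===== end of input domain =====

-- B replaces A's per-index parity loop with a length guard plus two strided-slice checks (idiomatic).

-- ===== PORT A =====
-- A's for-i-in-range loop with early returns, as structural recursion over the index list
def input_check_go (cs : List Char) : List Int → Bool
  | [] => true
  | i :: rest =>
    if i % 2 ≠ 0 then
      match PySem.List.pyGet? cs i with
      | some c => if c ≠ ' ' then false else input_check_go cs rest
      | none => false
    else
      match PySem.List.pyGet? cs i with
      | some c => if ¬ PySem.Chars.isalpha c then false else input_check_go cs rest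
      | none => false

def input_check (row : String) : Bool :=
  if row.toList.length ≠ 7 then false
  else input_check_go row.toList (PySem.List.pyRange 0 (row.toList.length : Int) 1)

-- ===== PORT B =====
-- len(row) == 7 and row[::2].isalpha() and row[1::2] == '   '
def input_check_alt (row : String) : Bool :=
  row.toList.length == 7 &&
  PySem.Chars.strIsalpha ((PySem.List.slice? row.toList none none 2).getD []) &&
  (((PySem.List.slice? row.toList (some 1) none 2).getD []) == "   ".toList)

-- ===== PRECONDITION & SPEC =====
def Spec_input_check (row : String) (out : Bool) : Prop := out = input_check_alt row
instance (row : String) (out : Bool) : Decidable (Spec_input_check row out) := by unfold Spec_input_check; infer_instance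

-- ===== CLAIM (what is proved, stated in full; the proofs are below) =====
def Claim_equal_input_check : Prop := ∀ (row : String), Dom_input_check row → Spec_input_check row (input_check row)

-- ===== LEMMAS AND PROOFS =====
theorem slice_even7 (a b c d e f g : Char) :
    PySem.List.slice? [a,b,c,d,e,f,g] none none 2 = some [a,c,e,g] := by
  simp [PySem.List.slice?, PySem.List.sliceIndices, List.range_succ]

theorem slice_odd7 (a b c d e f g : Char) :
    PySem.List.slice? [a,b,c,d,e,f,g] (some 1) none 2 = some [b,d,f] := by
  simp [PySem.List.slice?, PySem.List.sliceIndices, List.range_succ]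

theorem go_eq7 (a b c d e f g : Char) :
    input_check_go [a,b,c,d,e,f,g] (PySem.List.pyRange 0 7 1)
      = (PySem.Chars.strIsalpha [a,c,e,g] && ([b,d,f] == "   ".toList)) := by
  rw [show PySem.List.pyRange 0 7 1 = [0,1,2,3,4,5,6] from by decide]
  simp [input_check_go, PySem.List.pyGet?, PySem.List.pyIdx?, PySem.Chars.strIsalpha]
  simp only [beq_eq_decide]
  ac_rfl

theorem key (row : String) : input_check row = input_check_alt row := by
  unfold input_check input_check_alt
  generalize row.toList = l
  by_cases h : l.length = 7
  · obtain ⟨a, b, c, d, e, f, g, rfl⟩ : ∃ a b c d e f g, l = [a,b,c,d,e,f,g] := by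
      match l, h with | [a,b,c,d,e,f,g], _ => exact ⟨a, b, c, d, e, f, g, rfl⟩
    simp [slice_even7, slice_odd7, go_eq7]
  · simp [h]

-- ===== VERDICT (by name: the statement is the Claim_ definition above) =====
theorem input_check_spec : Claim_equal_input_check := by
  intro row _; exact key row
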